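-- pv_equiv track=rewrite | github.com/yypark21/my_coding_test | level1_python/2.py | solution
-- ===== SOURCE A (Python) =====
-- def solution(new_id):
--     answer = ''
--
--     for i in new_id.lower():
--         if (i >= 'a' and i <='z') or (i>='0' and i<='9') or i == '.' or i == '-' or i == '_' :
--             answer+=i
--     while '..' in answer:
--         answer=answer.replace('..','.')
--     answer = answer.strip('.')
--     answer = answer[0:15].strip('.')
--     if answer == '':
--         answer += 'a'
--     if len(answer) <= 2:
--         while 1 :
--             answer+=answer[-1]
--             if len(answer) >= 3:
--                 break
--     return answer
-- ===== SOURCE B (Python) =====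
-- def solution(new_id):
--     # single pass: lowercase+filter and collapse/skip dots as we go, then fix the ends
--     out = []
--     for c in new_id:
--         d = c.lower()
--         if 'a' <= d <= 'z' or '0' <= d <= '9' or d == '-' or d == '_':
--             out.append(d)
--         elif d == '.':
--             if out and out[-1] != '.':
--                 out.append('.')
--     if out and out[-1] == '.':
--         out.pop()
--     s = out[:15]
--     if s and s[-1] == '.':
--         s.pop()
--     if not s:
--         s = ['a']
--     if len(s) < 3:
--         s = (s + [s[-1]] * 3)[:3]
--     return ''.join(s)
-- ===== Notes on version B (the rewrite author's own statement) =====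
-- stated objective: alternative
-- what changed: B sanitizes in one left-to-right pass that lowercases, filters and collapses/drops consecutive or leading dots on the fly, then removes at most one trailing dot before and after the 15-char cut, instead of A's repeated whole-string replace passes and two strip calls.
import Mathlib
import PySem

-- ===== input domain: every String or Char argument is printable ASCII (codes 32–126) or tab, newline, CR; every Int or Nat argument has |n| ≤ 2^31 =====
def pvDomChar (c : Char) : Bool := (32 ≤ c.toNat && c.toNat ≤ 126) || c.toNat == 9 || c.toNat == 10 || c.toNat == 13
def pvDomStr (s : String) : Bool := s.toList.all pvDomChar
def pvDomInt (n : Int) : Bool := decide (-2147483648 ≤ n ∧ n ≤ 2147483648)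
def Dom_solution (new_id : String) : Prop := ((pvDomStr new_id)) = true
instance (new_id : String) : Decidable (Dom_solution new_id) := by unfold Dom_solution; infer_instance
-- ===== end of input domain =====

-- B replaces A's repeated str.replace('..','.') passes and strip('.') calls by one
-- left-to-right pass that filters and collapses/drops dots on the fly (alternative
-- single-pass algorithm; return values proved equal on all strings).

-- ===== PORT A =====
-- the character test of A's loop, on the already-lowered character
def pvAllowedA (i : Char) : Bool :=
  (decide ('a' ≤ i) && decide (i ≤ 'z')) || (decide ('0' ≤ i) && decide (i ≤ '9')) ||
  (i == '.') || (i == '-') || (i == '_')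

-- "while '..' in answer: answer = answer.replace('..','.')" — fuel makes the loop total;
-- fuel = length suffices since each replace with '..' present strictly shrinks the string
def pvWhileRepl : Nat → List Char → List Char
  | 0, s => s
  | f + 1, s =>
    if PySem.Chars.isIn ['.', '.'] s then pvWhileRepl f (PySem.Chars.replace s ['.', '.'] ['.'])
    else s

-- "while 1: answer += answer[-1]; if len(answer) >= 3: break" — at most 2 iterations
def pvPad : Nat → List Char → List Char
  | 0, s => s
  | f + 1, s =>
    let s' := s ++ [PySem.List.pyGetD s (-1) 'a']
    if 3 ≤ s'.length then s' else pvPad f s'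

def solution (new_id : String) : String :=
  let answer := (PySem.Chars.lower new_id.toList).foldl
    (fun acc i => if pvAllowedA i then acc ++ [i] else acc) []
  let answer := pvWhileRepl answer.length answer
  let answer := PySem.Chars.stripChars answer ['.']
  let answer := PySem.Chars.stripChars (PySem.List.slice answer (some 0) (some 15)) ['.']
  let answer := if answer = [] then answer ++ ['a'] else answer
  let answer := if answer.length ≤ 2 then pvPad 2 answer else answer
  String.ofList answer

-- ===== PORT B =====
-- B's character test: allowed and not a dot
def pvAllowedB (d : Char) : Bool :=
  (decide ('a' ≤ d) && decide (d ≤ 'z')) || (decide ('0' ≤ d) && decide (d ≤ '9')) ||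
  (d == '-') || (d == '_')

def solution_alt (new_id : String) : String :=
  let out := new_id.toList.foldl
    (fun acc c =>
      let d := PySem.Chars.lowerChar c
      if pvAllowedB d then acc ++ [d]
      else if d = '.' then
        (if acc ≠ [] ∧ PySem.List.pyGetD acc (-1) 'a' ≠ '.' then acc ++ ['.'] else acc)
      else acc) []
  let out := if out ≠ [] ∧ PySem.List.pyGetD out (-1) 'a' = '.' then out.dropLast else out
  let s := out.take 15
  let s := if s ≠ [] ∧ PySem.List.pyGetD s (-1) 'a' = '.' then s.dropLast else s
  let s := if s = [] then ['a'] else s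
  let s := if s.length < 3 then (s ++ List.replicate 3 (PySem.List.pyGetD s (-1) 'a')).take 3 else s
  String.ofList s

-- ===== PRECONDITION & SPEC =====
def Spec_solution (new_id : String) (out : String) : Prop := out = solution_alt new_id
instance (new_id : String) (out : String) : Decidable (Spec_solution new_id out) := by unfold Spec_solution; infer_instance

-- ===== CLAIM (what is proved, stated in full; the proofs are below) =====
def Claim_equal_solution : Prop := ∀ (new_id : String), Dom_solution new_id → Spec_solution new_id (solution new_id)

-- ===== LEMMAS AND PROOFS =====

-- one scanning pass of replace('..','.')
def pvR : List Char → List Char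
  | [] => []
  | [a] => [a]
  | a :: b :: t => if a = '.' ∧ b = '.' then '.' :: pvR t else a :: pvR (b :: t)

-- collapse every run of dots to a single dot (the fixpoint of pvR)
def pvColl : List Char → List Char
  | [] => []
  | [a] => [a]
  | a :: b :: t => if a = '.' ∧ b = '.' then pvColl (b :: t) else a :: pvColl (b :: t)

-- B's dot-collapsing pass, abstracted: the Bool says "a dot may be emitted here"
def pvEmit : Bool → List Char → List Char
  | _, [] => []
  | b, c :: t => if c = '.' then (if b then '.' :: pvEmit false t else pvEmit false t)
                 else c :: pvEmit true t

theorem pvFilterA (l acc : List Char) :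
    l.foldl (fun acc i => if pvAllowedA i then acc ++ [i] else acc) acc
      = acc ++ l.filter pvAllowedA := by
  induction l generalizing acc with
  | nil => simp
  | cons c t ih =>
    by_cases h : pvAllowedA c <;> simp [h, ih]

theorem pvGoEq (f : Nat) (l acc : List Char) (h : l.length ≤ f) :
    PySem.Chars.replace.go ['.', '.'] ['.'] f l acc = acc.reverse ++ pvR l := by
  induction f generalizing l acc with
  | zero =>
    have : l = [] := List.eq_nil_of_length_eq_zero (Nat.le_zero.mp h)
    subst this
    rw [PySem.Chars.replace.go.eq_1]
    simp [pvR]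
  | succ f ih =>
    cases l with
    | nil =>
      rw [PySem.Chars.replace.go.eq_2 _ _ _ _ (by simp)]
      simp [pvR]
    | cons c t =>
      rw [PySem.Chars.replace.go.eq_3]
      by_cases hp : List.isPrefixOf ['.', '.'] (c :: t) = true
      · have hpre : ['.', '.'] <+: c :: t := List.isPrefixOf_iff_prefix.mp hp
        obtain ⟨s, hs⟩ := hpre
        simp only [List.cons_append, List.nil_append, List.cons.injEq] at hs
        obtain ⟨rfl, rfl⟩ := hs
        have hl : s.length ≤ f := by simp only [List.length_cons] at h; omega
        simp only [hp, if_true, List.length_cons, List.length_nil, List.drop_succ_cons, List.drop_zero, List.reverse_cons,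
          List.reverse_nil, List.nil_append, List.singleton_append]
        rw [ih s ('.' :: acc) hl]
        simp [pvR]
      · simp only [hp, if_false, Bool.false_eq_true]
        rw [ih t (c :: acc) (by simp only [List.length_cons] at h; omega)]
        cases t with
        | nil => simp [pvR]
        | cons b t' =>
          have hcb : ¬ (c = '.' ∧ b = '.') := by
            rintro ⟨rfl, rfl⟩
            exact hp (List.isPrefixOf_iff_prefix.mpr ⟨t', rfl⟩)
          simp [pvR, hcb]

theorem pvReplaceEq (l : List Char) :
    PySem.Chars.replace l ['.', '.'] ['.'] = pvR l := by
  show (if List.isEmpty ['.', '.'] = true then _ else _) = _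
  rw [if_neg (by simp)]
  simpa using pvGoEq l.length l [] (le_refl _)

theorem pvR_dots (t : List Char) : pvR ('.' :: '.' :: t) = '.' :: pvR t := by
  simp [pvR]

theorem pvR_cons (a b : Char) (t : List Char) (h : ¬ (a = '.' ∧ b = '.')) :
    pvR (a :: b :: t) = a :: pvR (b :: t) := by
  simp [pvR, h]

theorem pvColl_dots (t : List Char) : pvColl ('.' :: '.' :: t) = pvColl ('.' :: t) := by
  simp [pvColl]

theorem pvColl_cons (a b : Char) (t : List Char) (h : ¬ (a = '.' ∧ b = '.')) :
    pvColl (a :: b :: t) = a :: pvColl (b :: t) := by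
  simp [pvColl, h]

theorem pvRLen (l : List Char) : (pvR l).length ≤ l.length := by
  induction l using pvR.induct with
  | case1 => simp [pvR]
  | case2 a => simp [pvR]
  | case3 a b t h ih =>
    obtain ⟨rfl, rfl⟩ := h
    rw [pvR_dots]
    simp only [List.length_cons]
    omega
  | case4 a b t h ih =>
    rw [pvR_cons a b t h]
    simp only [List.length_cons] at ih ⊢
    omega

theorem pvRLenLt (l : List Char) (h : ['.', '.'] <:+: l) : (pvR l).length < l.length := by
  induction l using pvR.induct with
  | case1 => simpa using h.length_le
  | case2 a => simpa using h.length_le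
  | case3 a b t hd ih =>
    obtain ⟨rfl, rfl⟩ := hd
    have := pvRLen t
    rw [pvR_dots]
    simp only [List.length_cons]
    omega
  | case4 a b t hd ih =>
    have hbt : ['.', '.'] <:+: b :: t := by
      rcases List.infix_cons_iff.mp h with hp | hi
      · exfalso
        rcases hp with ⟨s, hs⟩
        simp only [List.cons_append, List.nil_append, List.cons.injEq] at hs
        exact hd ⟨hs.1.symm, hs.2.1.symm⟩
      · exact hi
    have := ih hbt
    rw [pvR_cons a b t hd]
    simp only [List.length_cons] at this ⊢
    omega

theorem pvCollR (l : List Char) :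
    pvColl (pvR l) = pvColl l ∧ ∀ c, pvColl (c :: pvR l) = pvColl (c :: l) := by
  induction l using pvR.induct with
  | case1 => simp [pvR]
  | case2 a => simp [pvR]
  | case3 a b t hd ih =>
    obtain ⟨rfl, rfl⟩ := hd
    have h1 : pvColl ('.' :: pvR t) = pvColl ('.' :: t) := ih.2 '.'
    constructor
    · rw [pvR_dots, pvColl_dots]
      exact h1
    · intro c
      rw [pvR_dots]
      by_cases hc : c = '.'
      · subst hc
        rw [pvColl_dots, pvColl_dots, pvColl_dots]
        exact h1
      · have hcd : ¬ (c = '.' ∧ ('.' : Char) = '.') := fun hh => hc hh.1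
        rw [pvColl_cons c '.' (pvR t) hcd, pvColl_cons c '.' ('.' :: t) hcd, pvColl_dots, h1]
  | case4 a b t hd ih =>
    have h1 : pvColl (a :: pvR (b :: t)) = pvColl (a :: b :: t) := ih.2 a
    constructor
    · rw [pvR_cons a b t hd]
      exact h1
    · intro c
      rw [pvR_cons a b t hd]
      by_cases hc : c = '.' ∧ a = '.'
      · obtain ⟨rfl, rfl⟩ := hc
        rw [pvColl_dots, pvColl_dots]
        exact h1
      · rw [pvColl_cons c a (pvR (b :: t)) hc, pvColl_cons c a (b :: t) hc, h1]

theorem pvCollNoInfix (l : List Char) (h : ¬ ['.', '.'] <:+: l) : pvColl l = l := by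
  induction l using pvColl.induct with
  | case1 => simp [pvColl]
  | case2 a => simp [pvColl]
  | case3 a b t hd ih =>
    obtain ⟨rfl, rfl⟩ := hd
    exact absurd (List.isPrefixOf_iff_prefix.mp (by simp) : ['.', '.'] <+: '.' :: '.' :: t).isInfix h
  | case4 a b t hd ih =>
    rw [pvColl_cons a b t hd]
    rw [ih fun hi => h (hi.trans (List.suffix_cons a (b :: t)).isInfix)]

theorem pvWhileEq (f : Nat) (l : List Char) (h : l.length ≤ f) :
    pvWhileRepl f l = pvColl l := by
  induction f generalizing l with
  | zero =>
    have : l = [] := List.eq_nil_of_length_eq_zero (Nat.le_zero.mp h)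
    subst this
    simp [pvWhileRepl, pvColl]
  | succ f ih =>
    by_cases hin : PySem.Chars.isIn ['.', '.'] l = true
    · have hinf : ['.', '.'] <:+: l := (PySem.Chars.isIn_iff_infix _ _).mp hin
      have hlt := pvRLenLt l hinf
      simp only [pvWhileRepl, hin, if_true]
      rw [pvReplaceEq, ih (pvR l) (by omega)]
      exact (pvCollR l).1
    · simp only [pvWhileRepl, hin, Bool.false_eq_true, if_false]
      exact (pvCollNoInfix l ((PySem.Chars.isIn_eq_false_iff _ _).mp
        (Bool.not_eq_true _ |>.mp hin))).symm

theorem pvCollHead (b : Char) (t : List Char) : (pvColl (b :: t)).head? = some b := by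
  suffices h : ∀ l, ∀ b t, l = b :: t → (pvColl l).head? = some b from h _ b t rfl
  intro l
  induction l using pvColl.induct with
  | case1 => intro b t h; cases h
  | case2 a =>
    rintro b t ⟨rfl, rfl⟩
    simp [pvColl]
  | case3 a b' t hd ih =>
    obtain ⟨rfl, rfl⟩ := hd
    rintro b t' heq
    cases heq
    rw [pvColl_dots]
    exact ih '.' t rfl
  | case4 a b' t hd ih =>
    rintro b t' heq
    cases heq
    rw [pvColl_cons a b' t hd]
    simp

theorem pvColl_cons_nondot (c : Char) (t : List Char) (hc : c ≠ '.') :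
    pvColl (c :: t) = c :: pvColl t := by
  cases t with
  | nil => simp [pvColl]
  | cons b t' => exact pvColl_cons c b t' fun hh => hc hh.1

theorem pvCollNoTwo (l : List Char) :
    List.IsChain (fun a b => ¬(a = '.' ∧ b = '.')) (pvColl l) := by
  induction l using pvColl.induct with
  | case1 => simp [pvColl]
  | case2 a => simp [pvColl]
  | case3 a b t hd ih =>
    obtain ⟨rfl, rfl⟩ := hd
    rw [pvColl_dots]
    exact ih
  | case4 a b t hd ih =>
    rw [pvColl_cons a b t hd]
    rw [List.isChain_cons]
    refine ⟨?_, ih⟩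
    intro y hy
    rw [pvCollHead b t] at hy
    cases hy
    exact hd

theorem pvDropIdem (p : Char → Bool) (l : List Char) :
    (l.dropWhile p).dropWhile p = l.dropWhile p := by
  induction l with
  | nil => simp
  | cons c t ih =>
    by_cases h : p c = true
    · simpa [List.dropWhile_cons, h] using ih
    · simp [List.dropWhile_cons, h]

theorem pvCollDotCons (t : List Char) :
    pvColl ('.' :: t) = '.' :: (pvColl t).dropWhile (· == '.') := by
  induction t using pvColl.induct with
  | case1 => simp [pvColl]
  | case2 a =>
    by_cases ha : a = '.'
    · subst ha
      simp [pvColl_dots, pvColl]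
    · rw [pvColl_cons_nondot a [] ha]
      simp [pvColl, ha]
  | case3 a b t hd ih =>
    obtain ⟨rfl, rfl⟩ := hd
    rw [pvColl_dots ('.' :: t), pvColl_dots t]
    rw [pvColl_dots t] at ih
    exact ih
  | case4 a b t hd ih =>
    by_cases ha : a = '.'
    · subst ha
      have hb : b ≠ '.' := fun hb => hd ⟨rfl, hb⟩
      rw [pvColl_dots, pvColl_cons '.' b t (fun hh => hb hh.2), pvColl_cons_nondot b t hb]
      simp [hb]
    · rw [pvColl_cons '.' a (b :: t) (fun hh => ha hh.2), pvColl_cons a b t hd]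
      simp [ha]

theorem pvEmitEq (l : List Char) :
    pvEmit true l = pvColl l ∧ pvEmit false l = (pvColl l).dropWhile (· == '.') := by
  induction l with
  | nil => simp [pvEmit, pvColl]
  | cons c t ih =>
    by_cases hc : c = '.'
    · subst hc
      constructor
      · show (if ('.' : Char) = '.' then _ else _) = _
        rw [if_pos rfl, pvCollDotCons, ih.2]
        simp
      · show (if ('.' : Char) = '.' then _ else _) = _
        rw [if_pos rfl, pvCollDotCons, ih.2]
        simp [pvDropIdem]
    · constructor
      · show (if c = '.' then _ else _) = _
        rw [if_neg hc, pvColl_cons_nondot c t hc, ih.1]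
      · show (if c = '.' then _ else _) = _
        rw [if_neg hc, pvColl_cons_nondot c t hc, ih.1]
        simp [hc]

theorem pvHeadDrop (p : Char → Bool) (l : List Char) :
    ∀ y ∈ (l.dropWhile p).head?, p y = false := by
  induction l with
  | nil => simp
  | cons c t ih =>
    by_cases h : p c = true
    · simpa [List.dropWhile_cons, h] using ih
    · simp [List.dropWhile_cons, h]

theorem pvHeadPrefix {l₁ l₂ : List Char} (h : l₁ <+: l₂) : ∀ y ∈ l₁.head?, y ∈ l₂.head? := by
  obtain ⟨t, rfl⟩ := h
  cases l₁ <;> simp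

theorem pvDropNone (l : List Char) (h : ∀ y ∈ l.head?, (y == '.') = false) :
    l.dropWhile (· == '.') = l := by
  cases l with
  | nil => simp
  | cons c t => simp [List.dropWhile_cons, h c (by simp)]

theorem pvPopIff (l : List Char) :
    (l ≠ [] ∧ PySem.List.pyGetD l (-1) 'a' = '.') ↔ l.getLast? = some '.' := by
  constructor
  · rintro ⟨hne, hdot⟩
    rw [PySem.List.pyGetD_neg_one l 'a' hne] at hdot
    rw [List.getLast?_eq_getLast hne, hdot]
  · intro h
    have hne : l ≠ [] := by rintro rfl; simp at h
    refine ⟨hne, ?_⟩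
    rw [PySem.List.pyGetD_neg_one l 'a' hne]
    rw [List.getLast?_eq_getLast hne] at h
    exact Option.some.inj h

theorem pvRstrip (v : List Char)
    (h : List.IsChain (fun a b => ¬(a = '.' ∧ b = '.')) v) :
    (List.dropWhile (· == '.') v.reverse).reverse
      = if v.getLast? = some '.' then v.dropLast else v := by
  induction v using List.reverseRecOn with
  | nil => simp
  | append_singleton l x _ =>
    by_cases hx : x = '.'
    · subst hx
      rw [if_pos List.getLast?_concat, List.dropLast_concat]
      have h1 : (l ++ ['.']).reverse = '.' :: l.reverse := by simp
      rw [h1, List.dropWhile_cons]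
      simp only [beq_self_eq_true, if_true]
      rcases hl : l.reverse with _ | ⟨y, t⟩
      · have : l = [] := by simpa using congrArg List.reverse hl
        subst this
        simp
      · have hl2 : (l ++ ['.']).reverse = '.' :: y :: t := by simp [hl]
        have hch : List.IsChain (fun a b => ¬(b = '.' ∧ a = '.')) ('.' :: y :: t) := by
          rw [← hl2]
          exact List.isChain_reverse.mpr h
        have hy : y ≠ '.' := by
          have := (List.isChain_cons.mp hch).1 y (by simp)
          exact fun hyy => this ⟨hyy, rfl⟩
        rw [List.dropWhile_cons]
        simp only [beq_iff_eq, hy, if_false]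
        have hll : l = (y :: t).reverse := by simpa using congrArg List.reverse hl
        rw [hll]
    · rw [if_neg (by simp [hx])]
      have h1 : (l ++ [x]).reverse = x :: l.reverse := by simp
      rw [h1, List.dropWhile_cons]
      simp [hx]

theorem pvA_eq (d : Char) : pvAllowedA d = (pvAllowedB d || (d == '.')) := by
  simp [pvAllowedA, pvAllowedB, Bool.or_comm, Bool.or_left_comm]

theorem pvEmit_cons_nondot (b : Bool) (d : Char) (r : List Char) (hd : d ≠ '.') :
    pvEmit b (d :: r) = d :: pvEmit true r := by
  simp [pvEmit, hd]

theorem pvEmit_dot_true (r : List Char) : pvEmit true ('.' :: r) = '.' :: pvEmit false r := by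
  simp [pvEmit]

theorem pvEmit_dot_false (r : List Char) : pvEmit false ('.' :: r) = pvEmit false r := by
  simp [pvEmit]

theorem pvBInv (l acc : List Char) :
    l.foldl (fun acc c =>
      let d := PySem.Chars.lowerChar c
      if pvAllowedB d then acc ++ [d]
      else if d = '.' then
        (if acc ≠ [] ∧ PySem.List.pyGetD acc (-1) 'a' ≠ '.' then acc ++ ['.'] else acc)
      else acc) acc
    = acc ++ pvEmit (decide (acc ≠ [] ∧ PySem.List.pyGetD acc (-1) 'a' ≠ '.'))
        ((PySem.Chars.lower l).filter pvAllowedA) := by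
  induction l generalizing acc with
  | nil => simp [PySem.Chars.lower, pvEmit]
  | cons c t ih =>
    rw [List.foldl_cons]
    have hlow : (PySem.Chars.lower (c :: t)) = PySem.Chars.lowerChar c :: PySem.Chars.lower t := by
      simp [PySem.Chars.lower]
    rw [hlow]
    show (t.foldl _ (if pvAllowedB (PySem.Chars.lowerChar c) then acc ++ [PySem.Chars.lowerChar c]
      else if PySem.Chars.lowerChar c = '.' then
        (if acc ≠ [] ∧ PySem.List.pyGetD acc (-1) 'a' ≠ '.' then acc ++ ['.'] else acc)
      else acc)) = _
    set d := PySem.Chars.lowerChar c with hdd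
    by_cases hB : pvAllowedB d = true
    · have hdot : d ≠ '.' := fun hdd' => by rw [hdd'] at hB; exact absurd hB (by decide)
      have hA : pvAllowedA d = true := by rw [pvA_eq]; simp [hB]
      rw [List.filter_cons_of_pos hA, if_pos hB, ih (acc ++ [d]),
        pvEmit_cons_nondot _ d _ hdot]
      have hflag : decide ((acc ++ [d]) ≠ [] ∧ PySem.List.pyGetD (acc ++ [d]) (-1) 'a' ≠ '.')
          = true := by
        rw [decide_eq_true_eq]
        exact ⟨by simp, by rw [PySem.List.pyGetD_neg_one_append_singleton]; exact hdot⟩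
      rw [hflag]
      simp
    · rw [if_neg hB]
      by_cases hdot : d = '.'
      · rw [if_pos hdot]
        have hA : pvAllowedA d = true := by rw [pvA_eq, hdot]; simp
        rw [List.filter_cons_of_pos hA, hdot]
        by_cases hf : acc ≠ [] ∧ PySem.List.pyGetD acc (-1) 'a' ≠ '.'
        · rw [if_pos hf, ih (acc ++ ['.']), decide_eq_true hf, pvEmit_dot_true]
          have hflag : decide ((acc ++ ['.']) ≠ [] ∧
              PySem.List.pyGetD (acc ++ ['.']) (-1) 'a' ≠ '.') = false := by
            rw [decide_eq_false_iff_not]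
            rintro ⟨-, hh⟩
            exact hh (PySem.List.pyGetD_neg_one_append_singleton acc '.' 'a')
          rw [hflag]
          simp
        · rw [if_neg hf, ih acc, decide_eq_false hf, pvEmit_dot_false]
      · rw [if_neg hdot]
        have hB' : pvAllowedB d = false := by simpa using hB
        have hA : pvAllowedA d = false := by
          rw [pvA_eq]
          simp [hB', hdot]
        rw [List.filter_cons_of_neg (by simp [hA]), ih acc]

theorem pvPadEq (s : List Char) (hne : s ≠ []) :
    (if s.length ≤ 2 then pvPad 2 s else s)
      = (if s.length < 3 then (s ++ List.replicate 3 (PySem.List.pyGetD s (-1) 'a')).take 3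
         else s) := by
  cases s with
  | nil => exact absurd rfl hne
  | cons a t =>
    cases t with
    | nil =>
      have h1 : PySem.List.pyGetD [a] (-1) 'a' = a := by
        rw [show [a] = [] ++ [a] from rfl, PySem.List.pyGetD_neg_one_append_singleton]
      have h2 : PySem.List.pyGetD [a, a] (-1) 'a' = a := by
        rw [show [a, a] = [a] ++ [a] from rfl, PySem.List.pyGetD_neg_one_append_singleton]
      norm_num [pvPad, h1, h2, List.replicate]
    | cons b t2 =>
      cases t2 with
      | nil =>
        have h1 : PySem.List.pyGetD [a, b] (-1) 'a' = b := by
          rw [show [a, b] = [a] ++ [b] from rfl, PySem.List.pyGetD_neg_one_append_singleton]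
        norm_num [pvPad, h1, List.replicate]
      | cons c t3 =>
        rw [if_neg (by simp), if_neg (by simp)]

theorem pvStripEq (s : List Char) :
    PySem.Chars.stripChars s ['.']
      = (List.dropWhile (· == '.') (List.dropWhile (· == '.') s).reverse).reverse := by
  have hcont : (fun c => List.contains ['.'] c) = (fun c : Char => c == '.') := by
    funext c
    by_cases hc : c = '.' <;> simp [hc]
  simp only [PySem.Chars.stripChars]
  rw [hcont]

theorem solution_spec : Claim_equal_solution := by
  unfold Claim_equal_solution
  intro new_id _
  unfold Spec_solution solution solution_alt
  simp only []
  rw [pvFilterA _ [], List.nil_append, pvWhileEq _ _ (le_refl _), pvBInv _ []]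
  rw [show decide ((([] : List Char)) ≠ [] ∧ PySem.List.pyGetD ([] : List Char) (-1) 'a' ≠ '.')
      = false by decide]
  rw [List.nil_append]
  rw [(pvEmitEq (List.filter pvAllowedA (PySem.Chars.lower new_id.toList))).2]
  rw [pvStripEq (pvColl (List.filter pvAllowedA (PySem.Chars.lower new_id.toList)))]
  set u := (pvColl (List.filter pvAllowedA (PySem.Chars.lower new_id.toList))).dropWhile (· == '.')
    with hudef
  have hchain : List.IsChain (fun a b => ¬(a = '.' ∧ b = '.')) u := by
    rw [hudef]
    exact (pvCollNoTwo _).suffix (List.dropWhile_suffix _)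
  have hhu : ∀ y ∈ u.head?, (y == '.') = false := by
    rw [hudef]
    exact pvHeadDrop _ _
  rw [pvRstrip u hchain]
  simp only [pvPopIff]
  set v := if u.getLast? = some '.' then u.dropLast else u with hvdef
  have hvu : v <+: u := by
    rw [hvdef]
    split_ifs
    · exact List.dropLast_prefix u
    · exact List.prefix_refl u
  have hslice : PySem.List.slice v (some 0) (some (15 : Int)) = v.take 15 := by
    rw [PySem.List.slice_zero_start, PySem.List.slice_to v (b := (15 : Int)) (by norm_num)]
    rfl
  rw [hslice, pvStripEq (v.take 15)]
  have h15 : v.take 15 <+: u := (List.take_prefix 15 v).trans hvu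
  rw [pvDropNone (v.take 15) (fun y hy => hhu y (pvHeadPrefix h15 y hy))]
  rw [pvRstrip (v.take 15) (hchain.prefix h15)]
  set w := if (v.take 15).getLast? = some '.' then (v.take 15).dropLast else v.take 15 with hwdef
  have hemp : (if w = [] then w ++ ['a'] else w) = (if w = [] then ['a'] else w) := by
    split_ifs with h
    · rw [h]
      rfl
    · rfl
  rw [hemp]
  set z := if w = [] then ['a'] else w with hzdef
  have hzne : z ≠ [] := by
    rw [hzdef]
    split_ifs with h
    · simp
    · exact h
  rw [pvPadEq z hzne]
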